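-- pv_equiv track=rewrite | github.com/chenjiasheng/leetcode_practice | users/chenjiasheng/20201211.py | stat_greater
-- ===== SOURCE A (Python) =====
-- from collections import defaultdict
--
-- def stat_greater(iterable, n):
--     stat = defaultdict(int)
--     for x in iterable:
--         stat[x] += 1
--     sorted_values = sorted(stat.keys())
--     grater_stat = defaultdict(int)
--     accumulate = 0
--     for value in sorted_values:
--         accumulate += stat[value]
--         grater_stat[value] = n - accumulate
--     return grater_stat
-- ===== SOURCE B (Python) =====
-- from collections import defaultdict
--
-- def stat_greater(iterable, n):
--     items = list(iterable)
--     greater_stat = defaultdict(int)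
--     for v in sorted(set(items)):
--         greater_stat[v] = n - sum(1 for x in items if x <= v)
--     return greater_stat
-- ===== Notes on version B (the rewrite author's own statement) =====
-- stated objective: simpler
-- what changed: B drops the counting dict and the running accumulator: for each distinct value v (sorted) it computes n minus a direct count of elements <= v by rescanning the list.
import Mathlib
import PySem

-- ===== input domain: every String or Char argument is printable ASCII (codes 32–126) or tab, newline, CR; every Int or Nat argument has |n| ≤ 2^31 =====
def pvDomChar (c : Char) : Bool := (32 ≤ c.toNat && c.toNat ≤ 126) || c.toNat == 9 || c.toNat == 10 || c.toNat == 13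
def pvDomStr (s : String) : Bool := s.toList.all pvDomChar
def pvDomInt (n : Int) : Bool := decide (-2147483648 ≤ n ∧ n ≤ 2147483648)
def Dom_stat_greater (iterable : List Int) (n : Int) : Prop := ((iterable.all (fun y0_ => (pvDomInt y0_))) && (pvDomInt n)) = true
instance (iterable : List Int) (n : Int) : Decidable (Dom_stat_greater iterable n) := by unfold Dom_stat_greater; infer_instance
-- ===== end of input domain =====

-- B replaces the counter dict + sort + running accumulator by a per-distinct-value direct
-- count of elements <= v over the list: simpler, no intermediate state (objective: simpler).

-- ===== PORT A =====
def stat_greater (iterable : List Int) (n : Int) : List (Int × Int) :=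
  -- stat = defaultdict(int); for x in iterable: stat[x] += 1
  let stat : PySem.Dict Int Int :=
    iterable.foldl (fun d x => d.modify x 0 (fun c => c + 1)) PySem.Dict.empty
  -- sorted_values = sorted(stat.keys())
  let sorted_values := PySem.List.sorted stat.keys (fun x => x) false
  -- accumulate loop building grater_stat
  let r :=
    sorted_values.foldl
      (fun s value =>
        let accumulate := s.2 + stat.getD value 0
        (s.1.insert value (n - accumulate), accumulate))
      ((PySem.Dict.empty : PySem.Dict Int Int), (0 : Int))
  r.1.items

-- ===== PORT B =====
def stat_greater_alt (iterable : List Int) (n : Int) : List (Int × Int) :=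
  -- for v in sorted(set(items)): result[v] = n - sum(1 for x in items if x <= v)
  (PySem.List.sorted (PySem.Set.ofList iterable) (fun x => x) false).map
    (fun v => (v, n - iterable.foldl (fun c x => if x ≤ v then c + 1 else c) (0 : Int)))

-- ===== PRECONDITION & SPEC =====
def Spec_stat_greater (iterable : List Int) (n : Int) (out : List (Int × Int)) : Prop := out = stat_greater_alt iterable n
instance (iterable : List Int) (n : Int) (out : List (Int × Int)) : Decidable (Spec_stat_greater iterable n out) := by unfold Spec_stat_greater; infer_instance

-- ===== CLAIM (what is proved, stated in full; the proofs are below) =====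
def Claim_equal_stat_greater : Prop := ∀ (iterable : List Int) (n : Int), Dom_stat_greater iterable n → Spec_stat_greater iterable n (stat_greater iterable n)

-- ===== LEMMAS AND PROOFS =====

-- countP of a disjoint union of predicates
theorem countP_split (l : List Int) (p q r : Int → Bool)
    (h : ∀ x ∈ l, r x = (p x || q x) ∧ ¬(p x = true ∧ q x = true)) :
    l.countP r = l.countP p + l.countP q := by
  induction l with
  | nil => simp
  | cons a t ih =>
    have ha := h a (by simp)
    have ht := ih (fun x hx => h x (by simp [hx]))
    simp only [List.countP_cons, ht]
    rcases ha with ⟨hr, hnq⟩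
    by_cases hp : p a = true <;> by_cases hq : q a = true <;>
      simp [hr, hp, hq] at * <;> omega

-- the accumulation loop of A, with stat already rewritten to counter
theorem loopA (iterable : List Int) (n : Int) :
    ∀ (ks : List Int) (d : PySem.Dict Int Int) (acc : Int),
      ks.Pairwise (· < ·) →
      (∀ x ∈ iterable, x ∈ ks ∨ ∀ u ∈ ks, x < u) →
      (∀ v ∈ ks, d.contains v = false) →
      acc = (iterable.countP (fun x => decide (x ∉ ks)) : Int) →
      (ks.foldl
          (fun s value =>
            (s.1.insert value (n - (s.2 + (PySem.Dict.counter iterable).getD value 0)),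
             s.2 + (PySem.Dict.counter iterable).getD value 0))
          (d, acc)).1.items
        = d.items ++ ks.map (fun v => (v, n - (iterable.countP (fun x => decide (x ≤ v)) : Int))) := by
  intro ks
  induction ks with
  | nil => intro d acc _ _ _ _; simp
  | cons v rest ih =>
    intro d acc hpw hcov hfresh hacc
    have hvlt : ∀ u ∈ rest, v < u := (List.pairwise_cons.mp hpw).1
    have hpwr : rest.Pairwise (· < ·) := (List.pairwise_cons.mp hpw).2
    have hvnotr : v ∉ rest := fun h => lt_irrefl v (hvlt v h)
    -- accumulate after this step = # elements ≤ v
    have hcnt : acc + (PySem.Dict.counter iterable).getD v 0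
        = (iterable.countP (fun x => decide (x ≤ v)) : Int) := by
      rw [hacc, PySem.Dict.getD_counter, List.count_eq_countP]
      have hsplit : iterable.countP (fun x => decide (x ≤ v))
          = iterable.countP (fun x => decide (x ∉ v :: rest))
            + iterable.countP (fun x => x == v) := by
        apply countP_split
        intro x hx
        rcases hcov x hx with hmem | hlt
        · rcases List.mem_cons.mp hmem with rfl | hr
          · simp [hvnotr]
          · have := hvlt x hr
            have hxv : ¬ x ≤ v := not_le.mpr this
            have hne : x ≠ v := ne_of_gt this
            simp [hxv, hmem, hne]
        · have h1 : x < v := hlt v (by simp)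
          have h2 : x ∉ v :: rest := by
            intro hm
            exact absurd (hlt x hm) (lt_irrefl x)
          have hne : x ≠ v := ne_of_lt h1
          simp [le_of_lt h1, h2, hne]
      have : (fun x => x == v) = (fun x : Int => decide (x = v)) := by
        funext x; rfl
      rw [hsplit, this]
      push_cast
      ring
    -- the new suffix invariant
    have hcov' : ∀ x ∈ iterable, x ∈ rest ∨ ∀ u ∈ rest, x < u := by
      intro x hx
      rcases hcov x hx with hmem | hlt
      · rcases List.mem_cons.mp hmem with rfl | hr
        · exact Or.inr hvlt
        · exact Or.inl hr
      · exact Or.inr fun u hu => hlt u (by simp [hu])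
    have hacc' : acc + (PySem.Dict.counter iterable).getD v 0
        = (iterable.countP (fun x => decide (x ∉ rest)) : Int) := by
      rw [hcnt]
      congr 1
      apply List.countP_congr
      intro x hx
      rcases hcov x hx with hmem | hlt
      · rcases List.mem_cons.mp hmem with rfl | hr
        · simp [hvnotr]
        · have := hvlt x hr
          simp [not_le.mpr this, hr]
      · have h1 : x < v := hlt v (by simp)
        have h2 : x ∉ rest := fun hm => absurd (hlt x (by simp [hm])) (lt_irrefl x)
        simp [le_of_lt h1, h2]
    have hfresh' : ∀ u ∈ rest, (d.insert v (n - (acc + (PySem.Dict.counter iterable).getD v 0))).contains u = false := by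
      intro u hu
      rw [PySem.Dict.contains_insert]
      have hne : u ≠ v := ne_of_gt (hvlt u hu)
      simp [hne, hfresh u (by simp [hu])]
    have := ih (d.insert v (n - (acc + (PySem.Dict.counter iterable).getD v 0)))
      (acc + (PySem.Dict.counter iterable).getD v 0) hpwr hcov' hfresh' hacc'
    simp only [List.foldl_cons, List.map_cons]
    rw [this, PySem.Dict.items_insert_of_not_contains _ _ (hfresh v (by simp)), hcnt]
    simp

-- bridge: B's inner foldl counts elements ≤ v
theorem inner_count (iterable : List Int) (v : Int) :
    iterable.foldl (fun c x => if x ≤ v then c + 1 else c) (0 : Int)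
      = (iterable.countP (fun x => decide (x ≤ v)) : Int) := by
  rw [PySem.List.foldl_ite_add_one (fun x => x ≤ v)]
  simp

-- ===== VERDICT (by name: the statement is the Claim_ definition above) =====
theorem stat_greater_spec : Claim_equal_stat_greater := by
  intro iterable n _
  unfold Spec_stat_greater stat_greater stat_greater_alt
  have hstat : iterable.foldl (fun d x => d.modify x 0 (fun c => c + 1)) PySem.Dict.empty
      = PySem.Dict.counter iterable := (PySem.Dict.counter_eq_foldl iterable).symm
  simp only [hstat, PySem.Dict.keys_counter]
  set ks := PySem.List.sorted (PySem.Set.ofList iterable) (fun x => x) false with hks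
  have hpw : ks.Pairwise (· < ·) := PySem.List.sorted_ofList_pairwise_lt iterable
  have hcov : ∀ x ∈ iterable, x ∈ ks ∨ ∀ u ∈ ks, x < u := by
    intro x hx
    exact Or.inl ((PySem.List.mem_sorted _ _ _ _).mpr ((PySem.Set.mem_ofList _ _).mpr hx))
  have hfresh : ∀ v ∈ ks, (PySem.Dict.empty : PySem.Dict Int Int).contains v = false := by
    intro v _; simp [PySem.Dict.contains_empty]
  have hacc : (0 : Int) = (iterable.countP (fun x => decide (x ∉ ks)) : Int) := by
    have h0 : iterable.countP (fun x => decide (x ∉ ks)) = 0 := by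
      rw [List.countP_eq_zero]
      intro x hx
      have hm : x ∈ ks := (PySem.List.mem_sorted _ _ _ _).mpr ((PySem.Set.mem_ofList _ _).mpr hx)
      simp [hm]
    rw [h0]
    rfl
  have hmain := loopA iterable n ks PySem.Dict.empty 0 hpw hcov hfresh hacc
  rw [hmain]
  have hemp : (PySem.Dict.empty : PySem.Dict Int Int).items = [] := rfl
  simp [inner_count, hemp]
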